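-- pv_equiv track=rewrite | github.com/ZoeLoveHGJ/Project_LODS_MTI | lods_mti_strict_algo.py | _find_perfect_seed
-- ===== SOURCE A (Python) =====
-- from typing import List, Tuple, Any, Optional
--
-- def _find_perfect_seed(epc_ints: List[int], mod_size: int) -> Optional[int]:
--     for seed in range(16):
--         slots = set()
--         collision = False
--         for val in epc_ints:
--             s = (val ^ seed) % mod_size
--             if s in slots:
--                 collision = True
--                 break
--             slots.add(s)
--         if not collision:
--             return seed
--     return None
-- ===== SOURCE B (Python) =====
-- from typing import List, Optional
--
-- def _find_perfect_seed(epc_ints: List[int], mod_size: int) -> Optional[int]: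
--     # Prune the candidate-seed set by pairwise collision tests: a seed survives
--     # iff no pair of values hashes to the same slot. Return the smallest survivor.
--     cand = set(range(16))
--     rest = epc_ints
--     while rest and cand:
--         a, rest = rest[0], rest[1:]
--         for b in rest:
--             cand = {s for s in cand if (a ^ s) % mod_size != (b ^ s) % mod_size}
--     return min(cand) if cand else None
-- ===== Notes on version B (the rewrite author's own statement) =====
-- stated objective: alternative
-- what changed: Instead of testing each seed by scanning the values with a running slot set and early break, B prunes a candidate set of all 16 seeds by pairwise collision tests (a seed survives iff no pair of values hashes equal) and returns the smallest surviving seed.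
import Mathlib
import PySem

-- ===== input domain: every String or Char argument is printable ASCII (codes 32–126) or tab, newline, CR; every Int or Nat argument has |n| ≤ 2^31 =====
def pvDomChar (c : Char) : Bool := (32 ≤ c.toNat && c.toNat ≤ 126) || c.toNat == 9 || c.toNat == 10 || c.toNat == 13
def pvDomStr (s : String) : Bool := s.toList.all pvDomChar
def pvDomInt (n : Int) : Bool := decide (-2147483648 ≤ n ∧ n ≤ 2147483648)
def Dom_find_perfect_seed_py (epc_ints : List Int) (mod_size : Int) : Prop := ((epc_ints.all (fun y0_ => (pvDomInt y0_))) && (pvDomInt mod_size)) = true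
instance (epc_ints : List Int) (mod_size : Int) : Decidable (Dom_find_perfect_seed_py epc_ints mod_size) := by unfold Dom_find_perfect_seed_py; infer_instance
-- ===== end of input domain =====

-- B replaces A's per-seed scan with a running set by pairwise pruning of a candidate-seed
-- set (a seed survives iff no pair of values collides), returning the smallest survivor;
-- objective: alternative algorithm, same result.


-- ===== PORT A =====
-- inner 'for val in epc_ints' loop: running set 'slots', early break on collision;
-- returns the final value of A's 'collision' flag
def pvA_inner (seed mod_size : Int) (slots : PySem.Set Int) : List Int → Bool
  | [] => false
  | v :: rest =>
    let s := PySem.Int.mod (PySem.Int.bxor v seed) mod_size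
    if PySem.Set.contains slots s then true
    else pvA_inner seed mod_size (PySem.Set.add slots s) rest

-- outer 'for seed in range(16)' loop with its early return
def pvA_loop (epc_ints : List Int) (mod_size : Int) : List Int → Option Int
  | [] => none
  | seed :: rest =>
    if pvA_inner seed mod_size PySem.Set.empty epc_ints then pvA_loop epc_ints mod_size rest
    else some seed

def find_perfect_seed_py (epc_ints : List Int) (mod_size : Int) : Option Int :=
  pvA_loop epc_ints mod_size (PySem.List.pyRange 0 16 1)

-- ===== PORT B =====
-- 'for b in rest: cand = {s for s in cand if (a ^ s) % m != (b ^ s) % m}'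
def pvB_inner (m a : Int) (cand : PySem.Set Int) : List Int → PySem.Set Int
  | [] => cand
  | b :: rest =>
    pvB_inner m a (PySem.Set.ofList (cand.filter (fun s => !(PySem.Int.mod (PySem.Int.bxor a s) m == PySem.Int.mod (PySem.Int.bxor b s) m)))) rest

-- 'while rest and cand: a, rest = rest[0], rest[1:]; <inner loop>'
def pvB_prune (m : Int) (cand : PySem.Set Int) : List Int → PySem.Set Int
  | [] => cand
  | a :: rest => if cand.isEmpty then cand else pvB_prune m (pvB_inner m a cand rest) rest

-- 'min(cand) if cand else None' is exactly min? (none on the empty set)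
def find_perfect_seed_py_alt (epc_ints : List Int) (mod_size : Int) : Option Int :=
  PySem.List.min? (pvB_prune mod_size (PySem.Set.ofList (PySem.List.pyRange 0 16 1)) epc_ints)
    (fun s => s)

-- ===== PRECONDITION & SPEC =====
-- Pre_ excludes mod_size = 0 with a nonempty list: there A raises ZeroDivisionError.
def Pre_find_perfect_seed_py (epc_ints : List Int) (mod_size : Int) : Prop :=
  epc_ints = [] ∨ mod_size ≠ 0
instance (epc_ints : List Int) (mod_size : Int) : Decidable (Pre_find_perfect_seed_py epc_ints mod_size) := by unfold Pre_find_perfect_seed_py; infer_instance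
def pvWitness_find_perfect_seed_py : List Int × Int := ([1, 2, 3], 4)

def Spec_find_perfect_seed_py (epc_ints : List Int) (mod_size : Int) (out : Option Int) : Prop := out = find_perfect_seed_py_alt epc_ints mod_size
instance (epc_ints : List Int) (mod_size : Int) (out : Option Int) : Decidable (Spec_find_perfect_seed_py epc_ints mod_size out) := by unfold Spec_find_perfect_seed_py; infer_instance

-- ===== CLAIM (what is proved, stated in full; the proofs are below) =====
def Claim_equal_find_perfect_seed_py : Prop := ∀ (epc_ints : List Int) (mod_size : Int), Dom_find_perfect_seed_py epc_ints mod_size → Pre_find_perfect_seed_py epc_ints mod_size → Spec_find_perfect_seed_py epc_ints mod_size (find_perfect_seed_py epc_ints mod_size)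

-- ===== LEMMAS AND PROOFS =====

-- the hash of value a under seed s, modulo m (proof-side abbreviation)
def pvHash (m a s : Int) : Int := PySem.Int.mod (PySem.Int.bxor a s) m

lemma pvHash_def (m a s : Int) : PySem.Int.mod (PySem.Int.bxor a s) m = pvHash m a s := rfl

-- a seed is 'good' for a list: no pair of values collides (what B's pruning tests)
def pvOk (m s : Int) : List Int → Bool
  | [] => true
  | a :: rest => rest.all (fun b => !(pvHash m a s == pvHash m b s)) && pvOk m s rest

-- B's inner loop is a single filter by 'no collision of a with any b in rest'
lemma pvB_inner_eq_filter (m a : Int) (rest : List Int) : ∀ (cand : PySem.Set Int),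
    cand.Nodup →
    pvB_inner m a cand rest
      = cand.filter (fun s => rest.all (fun b => !(pvHash m a s == pvHash m b s))) := by
  induction rest with
  | nil => intro cand _; simp [pvB_inner]
  | cons b t ih =>
    intro cand hnd
    rw [pvB_inner, PySem.Set.ofList_eq_self_of_nodup _ (hnd.filter _),
        ih _ (hnd.filter _), List.filter_filter]
    apply List.filter_congr
    intro s _
    simp [pvHash_def, List.all_cons, Bool.and_comm]

-- B's recursive prune is a single filter by pvOk
lemma pvB_prune_eq_filter (m : Int) (l : List Int) : ∀ (cand : PySem.Set Int),
    cand.Nodup →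
    pvB_prune m cand l = cand.filter (fun s => pvOk m s l) := by
  induction l with
  | nil => intro cand _; simp [pvB_prune, pvOk]
  | cons a t ih =>
    intro cand hnd
    by_cases hc : cand.isEmpty
    · rw [List.isEmpty_iff] at hc
      simp [pvB_prune, hc]
    · rw [pvB_prune, if_neg hc, pvB_inner_eq_filter m a t cand hnd, ih _ (hnd.filter _),
          List.filter_filter]
      apply List.filter_congr
      intro s _
      simp [pvOk, Bool.and_comm]

-- A's inner loop returns 'no collision' iff the seed is good and no hash is already in slots
lemma pvA_inner_false_iff (seed m : Int) (l : List Int) : ∀ (slots : PySem.Set Int),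
    pvA_inner seed m slots l = false ↔
      (pvOk m seed l = true ∧ ∀ b ∈ l, pvHash m b seed ∉ slots) := by
  induction l with
  | nil => intro slots; simp [pvA_inner, pvOk]
  | cons v t ih =>
    intro slots
    by_cases hmem : pvHash m v seed ∈ slots
    · have hc : PySem.Set.contains slots (pvHash m v seed) = true := by simp [hmem]
      simp only [pvA_inner, pvHash_def, hc, if_true]
      constructor
      · intro h; cases h
      · rintro ⟨-, hall⟩; exact absurd hmem (hall v (by simp))
    · have hc : PySem.Set.contains slots (pvHash m v seed) = false := by simp [hmem]
      simp only [pvA_inner, pvHash_def, hc, Bool.false_eq_true, if_false]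
      rw [ih]
      constructor
      · rintro ⟨hok, hall⟩
        refine ⟨?_, ?_⟩
        · simp only [pvOk, Bool.and_eq_true, List.all_eq_true]
          refine ⟨fun b hb => ?_, hok⟩
          have := hall b hb
          simp only [PySem.Set.mem_add] at this
          push Not at this
          exact bne_iff_ne.mpr (Ne.symm this.2)
        · intro b hb
          simp only [List.mem_cons] at hb
          rcases hb with rfl | hb
          · exact hmem
          · have := hall b hb
            simp only [PySem.Set.mem_add] at this
            push Not at this
            exact this.1
      · rintro ⟨hok, hall⟩
        simp only [pvOk, Bool.and_eq_true, List.all_eq_true] at hok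
        refine ⟨hok.2, fun b hb => ?_⟩
        simp only [PySem.Set.mem_add]
        push Not
        refine ⟨hall b (by simp [hb]), ?_⟩
        have := hok.1 b hb
        exact Ne.symm (bne_iff_ne.mp this)

-- per-seed agreement: A's collision flag is the negation of pvOk
lemma pvA_inner_eq_not_ok (epc_ints : List Int) (m seed : Int) :
    pvA_inner seed m PySem.Set.empty epc_ints = !(pvOk m seed epc_ints) := by
  have hiff := pvA_inner_false_iff seed m epc_ints PySem.Set.empty
  cases ha : pvA_inner seed m PySem.Set.empty epc_ints <;>
    cases hb : pvOk m seed epc_ints <;> simp_all [PySem.Set.empty]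

-- A's seed loop is find? over the seed list
lemma pvA_loop_eq_find? (epc_ints : List Int) (m : Int) (seeds : List Int) :
    pvA_loop epc_ints m seeds = seeds.find? (fun seed => pvOk m seed epc_ints) := by
  induction seeds with
  | nil => rfl
  | cons seed rest ih =>
    simp only [pvA_loop, List.find?, pvA_inner_eq_not_ok]
    cases h : pvOk m seed epc_ints <;> simp [ih]

-- find? is the head of the filtered list
lemma pv_find?_eq_head?_filter {α : Type} (p : α → Bool) (l : List α) :
    l.find? p = (l.filter p).head? := by
  induction l with
  | nil => rfl
  | cons x t ih =>
    by_cases h : p x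
    · rw [List.find?_cons_of_pos h, List.filter_cons_of_pos h, List.head?_cons]
    · rw [List.find?_cons_of_neg h, List.filter_cons_of_neg h, ih]

-- the running min of a list bounded below by its start is the start
lemma pv_foldl_min_of_le (t : List Int) : ∀ (x : Int), (∀ y ∈ t, x ≤ y) → t.foldl min x = x := by
  induction t with
  | nil => intro x _; rfl
  | cons y t ih =>
    intro x h
    have hxy : min x y = x := min_eq_left (h y (by simp))
    simp only [List.foldl_cons, hxy]
    exact ih x (fun z hz => h z (by simp [hz]))

-- min? of a strictly increasing list is its head
lemma pv_min?_of_sorted (l : List Int) (hs : l.Pairwise (· < ·)) :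
    PySem.List.min? l (fun s => s) = l.head? := by
  cases l with
  | nil => simp [PySem.List.min?_eq_none_iff]
  | cons x t =>
    rw [PySem.List.min?_id_cons]
    have : t.foldl min x = x := by
      apply pv_foldl_min_of_le
      intro y hy
      exact le_of_lt ((List.pairwise_cons.mp hs).1 y hy)
    simp [this]

-- ===== VERDICT (by name: the statement is the Claim_ definition above) =====
theorem find_perfect_seed_py_spec : Claim_equal_find_perfect_seed_py := by
  intro epc_ints mod_size _ _
  unfold Spec_find_perfect_seed_py find_perfect_seed_py find_perfect_seed_py_alt
  have hnd : (PySem.List.pyRange 0 16 1).Nodup := PySem.List.nodup_pyRange_one 0 16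
  rw [PySem.Set.ofList_eq_self_of_nodup _ hnd,
      pvB_prune_eq_filter mod_size epc_ints _ hnd,
      pv_min?_of_sorted _ ((PySem.List.pairwise_lt_pyRange_one 0 16).filter _),
      pvA_loop_eq_find?, pv_find?_eq_head?_filter]
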